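-- pv_equiv track=rewrite | github.com/c0manch3/0xone-assistant | src/assistant/render_doc/markdown_tables.py | _split_pipes
-- ===== SOURCE A (Python) =====
-- def _split_pipes(line: str) -> list[str]:
--     """Split a pipe-table line into cells, honouring ``\\|`` escapes.
--
--     Strips the leading and trailing pipe characters (markdown pipe
--     tables conventionally bracket each row) before splitting; tables
--     written without leading/trailing pipes still parse correctly.
--     """
--     # Replace ``\\|`` with a sentinel that cannot appear in real
--     # markdown, split on ``|``, then restore.
--     sentinel = "\x00ESC_PIPE\x00"
--     line = line.replace("\\|", sentinel)
--     # Strip leading + trailing pipe.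
--     if line.startswith("|"):
--         line = line[1:]
--     if line.endswith("|"):
--         line = line[:-1]
--     cells = [
--         c.strip().replace(sentinel, "|") for c in line.split("|")
--     ]
--     return cells
-- ===== SOURCE B (Python) =====
-- def _split_pipes(line: str) -> list[str]:
--     """Split a pipe-table line into cells, honouring ``\\|`` escapes.
--
--     Single left-to-right scan (no sentinel replace/split/replace):
--     an optional leading pipe is skipped, then characters are consumed
--     into a cell buffer; ``\\|`` contributes a literal ``|``, an
--     unescaped ``|`` finishes a cell, and a trailing unescaped ``|``
--     finishes the row without opening an empty final cell.
--     """
--     cells = []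
--     buf = []
--     n = len(line)
--     i = 1 if line.startswith("|") else 0
--     while i < n:
--         c = line[i]
--         if c == "\\" and i + 1 < n and line[i + 1] == "|":
--             buf.append("|")
--             i += 2
--         elif c == "|":
--             cells.append("".join(buf).strip())
--             buf = []
--             i += 1
--             if i == n:
--                 return cells
--         else:
--             buf.append(c)
--             i += 1
--     cells.append("".join(buf).strip())
--     return cells
-- ===== Notes on version B (the rewrite author's own statement) =====
-- stated objective: alternative
-- what changed: Replaced A's three-pass sentinel pipeline (replace escaped pipes with a sentinel, strip bracket pipes, split on '|', then per-cell strip and restore) with a single left-to-right character scanner that maintains a current-cell buffer and handles escapes, cell boundaries and the trailing pipe in one pass.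
import Mathlib
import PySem

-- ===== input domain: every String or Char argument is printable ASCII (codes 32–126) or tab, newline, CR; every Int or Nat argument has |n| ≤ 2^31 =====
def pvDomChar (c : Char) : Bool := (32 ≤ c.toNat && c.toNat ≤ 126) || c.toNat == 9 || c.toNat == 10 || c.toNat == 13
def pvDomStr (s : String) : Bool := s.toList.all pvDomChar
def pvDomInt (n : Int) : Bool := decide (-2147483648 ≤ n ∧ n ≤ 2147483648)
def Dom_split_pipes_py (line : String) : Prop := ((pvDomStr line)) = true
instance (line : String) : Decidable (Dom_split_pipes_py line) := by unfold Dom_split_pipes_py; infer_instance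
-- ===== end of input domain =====

-- B replaces A's three-pass sentinel pipeline (replace escaped pipes, strip bracket
-- pipes, split on '|', per-cell strip-and-restore) with a single left-to-right
-- character scanner maintaining a current-cell buffer (alternative decomposition).


-- ===== PORT A =====
def split_pipes_py (line : String) : List String :=
  let sentinel : String := "\x00ESC_PIPE\x00"
  let line1 : String := PySem.Str.replace line "\\|" sentinel
  let line2 : String :=
    if PySem.Str.startswith line1 "|" then PySem.Str.slice line1 (some 1) none else line1
  let line3 : String :=
    if PySem.Str.endswith line2 "|" then PySem.Str.slice line2 none (some (-1)) else line2
  -- str.split with the nonempty separator "|" never fails; `.getD []` is unreachable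
  ((PySem.Str.split? line3 "|").getD []).map
    (fun c => PySem.Str.replace (PySem.Str.strip c) sentinel "|")

-- ===== PORT B =====
-- ''.join(buf).strip()
def pvJoinStrip (buf : List Char) : String := String.ofList (PySem.Chars.strip buf)

-- the while loop of Source B: l = chars not yet consumed, buf = current cell, cells = finished cells
def pvScanGo : List Char → List Char → List String → List String
  | [], buf, cells => cells ++ [pvJoinStrip buf]
  | c :: rest, buf, cells =>
    if c = '\\' ∧ rest.head? = some '|' then pvScanGo rest.tail (buf ++ ['|']) cells
    else if c = '|' then
      if rest.isEmpty then cells ++ [pvJoinStrip buf]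
      else pvScanGo rest [] (cells ++ [pvJoinStrip buf])
    else pvScanGo rest (buf ++ [c]) cells
termination_by l _ _ => l.length
decreasing_by all_goals simp [List.length_tail]

def split_pipes_py_alt (line : String) : List String :=
  pvScanGo (if PySem.Str.startswith line "|" then line.toList.tail else line.toList) [] []

-- ===== PRECONDITION & SPEC =====
def Spec_split_pipes_py (line : String) (out : List String) : Prop := out = split_pipes_py_alt line
instance (line : String) (out : List String) : Decidable (Spec_split_pipes_py line out) := by unfold Spec_split_pipes_py; infer_instance

-- ===== CLAIM (what is proved, stated in full; the proofs are below) =====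
def Claim_equal_split_pipes_py : Prop := ∀ (line : String), Dom_split_pipes_py line → Spec_split_pipes_py line (split_pipes_py line)

-- ===== LEMMAS AND PROOFS =====

-- The sentinel "\x00ESC_PIPE\x00" as a char list
def pvS : List Char := ['\x00','E','S','C','_','P','I','P','E','\x00']
-- encode one decoded cell character back to A's post-replace form
def pvEnc (c : Char) : List Char := if c = '|' then pvS else [c]
-- token: none = unescaped '|' separator, some c = one literal cell character
def pvEmit : Option Char → List Char
  | none => ['|']
  | some c => pvEnc c
-- tokenize a line by A's/B's common left-to-right escape scan
def pvToks : List Char → List (Option Char)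
  | [] => []
  | c :: rest =>
    if c = '\\' ∧ rest.head? = some '|' then some '|' :: pvToks rest.tail
    else (if c = '|' then none else some c) :: pvToks rest
termination_by l => l.length
decreasing_by all_goals simp [List.length_tail]

-- structural spec of splitOn on separator '|': (first cell, later cells)
def pvSp1 : List Char → List Char × List (List Char)
  | [] => ([], [])
  | c :: t => if c = '|' then ([], (pvSp1 t).1 :: (pvSp1 t).2)
              else (c :: (pvSp1 t).1, (pvSp1 t).2)

-- A's per-cell post-processing
def pvCell (x : List Char) : String :=
  String.ofList (PySem.Chars.replace (PySem.Chars.strip x) pvS ['|'])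

-- B's loop on the token level
def pvTC : List (Option Char) → List Char → List String → List String
  | [], buf, cells => cells ++ [pvJoinStrip buf]
  | some c :: t, buf, cells => pvTC t (buf ++ [c]) cells
  | none :: t, buf, cells =>
      if t.isEmpty then cells ++ [pvJoinStrip buf]
      else pvTC t [] (cells ++ [pvJoinStrip buf])

-- A's tail pipeline on the token level, with current cell prefix buf (decoded)
def pvAview (ts : List (Option Char)) (buf : List Char) : List String :=
  let r := buf.flatMap pvEnc ++ ts.flatMap pvEmit
  let r' := if PySem.Chars.endswith r ['|'] then r.dropLast else r
  pvCell (pvSp1 r').1 :: ((pvSp1 r').2).map pvCell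

def pvClean (ts : List (Option Char)) : Prop := ∀ c : Char, some c ∈ ts → c ≠ '\x00'
def pvCleanB (buf : List Char) : Prop := ∀ c ∈ buf, c ≠ '\x00'

theorem replace_go_toks (fuel : Nat) : ∀ (l acc : List Char), l.length ≤ fuel →
    PySem.Chars.replace.go ['\\','|'] pvS fuel l acc
      = acc.reverse ++ (pvToks l).flatMap pvEmit := by
  induction fuel with
  | zero =>
    intro l acc h
    have hl : l = [] := by cases l <;> simp_all
    subst hl; simp [PySem.Chars.replace.go, pvToks]
  | succ n ih =>
    intro l acc h
    match l with
    | [] => simp [PySem.Chars.replace.go, pvToks]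
    | c :: rest =>
      rw [PySem.Chars.replace.go]
      by_cases hc : c = '\\' ∧ rest.head? = some '|'
      · obtain ⟨hc1, hc2⟩ := hc
        cases rest with
        | nil => simp at hc2
        | cons r rs =>
          have hr : r = '|' := by simpa using hc2
          subst hc1; subst hr
          have hpre : List.isPrefixOf ['\\','|'] ('\\' :: '|' :: rs) = true := by
            simp [List.isPrefixOf]
          rw [if_pos hpre]
          simp only [List.length_cons, List.drop_succ_cons, List.length_nil, List.drop_zero]
          rw [ih rs _ (by simp at h ⊢; omega)]
          rw [pvToks]
          simp [pvEmit, pvEnc, pvS]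
      · have hpre : List.isPrefixOf ['\\','|'] (c :: rest) = false := by
          cases rest with
          | nil => simp [List.isPrefixOf]
          | cons r rs =>
            simp only [List.isPrefixOf, Bool.and_eq_false_iff, List.isPrefixOf_cons₂]
            by_cases h1 : c = '\\'
            · right
              have hr : ¬ r = '|' := by
                intro hr; exact hc ⟨h1, by simp [hr]⟩
              simp [List.isPrefixOf]
              intro h2; exact absurd h2.symm hr
            · left; simp; intro h2; exact absurd h2.symm h1
        rw [if_neg (by simp [hpre])]
        rw [ih rest _ (by simp at h ⊢; omega)]
        rw [pvToks, if_neg hc]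
        by_cases hp : c = '|' <;> simp [hp, pvEmit, pvEnc]

theorem replace_toks (l : List Char) :
    PySem.Chars.replace l ['\\','|'] pvS = (pvToks l).flatMap pvEmit := by
  rw [PySem.Chars.replace]
  simp only [List.isEmpty_cons, Bool.false_eq_true, if_false]
  simpa using replace_go_toks l.length l [] le_rfl

theorem splitOn_go_sp1 (fuel : Nat) : ∀ (l cur : List Char) (acc : List (List Char)),
    l.length ≤ fuel →
    PySem.Chars.splitOn.go ['|'] fuel l cur acc
      = acc.reverse ++ (cur.reverse ++ (pvSp1 l).1) :: (pvSp1 l).2 := by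
  induction fuel with
  | zero =>
    intro l cur acc h
    have hl : l = [] := by cases l <;> simp_all
    subst hl; simp [PySem.Chars.splitOn.go, pvSp1]
  | succ n ih =>
    intro l cur acc h
    match l with
    | [] => simp [PySem.Chars.splitOn.go, pvSp1]
    | c :: rest =>
      rw [PySem.Chars.splitOn.go]
      by_cases hc : c = '|'
      · subst hc
        have hpre : List.isPrefixOf ['|'] ('|' :: rest) = true := by simp [List.isPrefixOf]
        rw [if_pos hpre]
        simp only [List.length_cons, List.drop_succ_cons, List.length_nil, List.drop_zero]
        rw [ih rest [] _ (by simp at h ⊢; omega)]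
        simp [pvSp1]
      · have hpre : List.isPrefixOf ['|'] (c :: rest) = false := by
          simp [List.isPrefixOf]; intro h2; exact absurd h2.symm hc
        rw [if_neg (by simp [hpre])]
        rw [ih rest _ acc (by simp at h ⊢; omega)]
        simp [pvSp1, hc]

theorem splitOn_sp1 (l : List Char) :
    PySem.Chars.splitOn l ['|'] = (pvSp1 l).1 :: (pvSp1 l).2 := by
  rw [PySem.Chars.splitOn]
  simpa using splitOn_go_sp1 (l.length + 1) l [] [] (by omega)

-- '|' never occurs in an encoded cell
theorem enc_no_pipe (buf : List Char) : '|' ∉ buf.flatMap pvEnc := by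
  intro hmem
  simp only [List.mem_flatMap] at hmem
  obtain ⟨c, _, hc⟩ := hmem
  by_cases h : c = '|' <;> simp [pvEnc, h, pvS] at hc
  · exact h hc.symm

-- splitting a pipe-free list gives one cell
theorem sp1_no_pipe (x : List Char) (h : '|' ∉ x) : pvSp1 x = (x, []) := by
  induction x with
  | nil => simp [pvSp1]
  | cons c t ih =>
    simp only [List.mem_cons, not_or] at h
    have hc : ¬ c = '|' := fun hq => h.1 hq.symm
    simp [pvSp1, hc, ih h.2]

theorem sp1_append_no_pipe (x w : List Char) (h : '|' ∉ x) :
    pvSp1 (x ++ w) = (x ++ (pvSp1 w).1, (pvSp1 w).2) := by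
  induction x with
  | nil => simp
  | cons c t ih =>
    simp only [List.mem_cons, not_or] at h
    have hc : ¬ c = '|' := fun hq => h.1 hq.symm
    simp [pvSp1, hc, ih h.2]

theorem endswith_pipe_iff (z : List Char) :
    PySem.Chars.endswith z ['|'] = true ↔ z.getLast? = some '|' := by
  rw [PySem.Chars.endswith_iff]
  constructor
  · rintro ⟨t, rfl⟩; simp
  · intro h
    rcases List.getLast?_eq_some_iff.mp h with ⟨t, rfl⟩
    exact ⟨t, rfl⟩

-- the last char of an encoded cell is never '|'
theorem enc_getLast_ne_pipe (buf : List Char) :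
    (buf.flatMap pvEnc).getLast? ≠ some '|' := by
  induction buf with
  | nil => simp
  | cons c t ih =>
    simp only [List.flatMap_cons]
    rcases h : t.flatMap pvEnc with _ | ⟨d, ds⟩
    · simp only [List.append_nil]
      by_cases hc : c = '|' <;> simp [pvEnc, hc, pvS]
    · rw [List.getLast?_append_of_ne_nil _ (by simp)]
      rw [h] at ih; exact ih

theorem emit_ne_nil (o : Option Char) : pvEmit o ≠ [] := by
  cases o with
  | none => simp [pvEmit]
  | some c => by_cases h : c = '|' <;> simp [pvEmit, pvEnc, h, pvS]

theorem emitAll_ne_nil (ts : List (Option Char)) (h : ts ≠ []) : ts.flatMap pvEmit ≠ [] := by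
  cases ts with
  | nil => exact absurd rfl h
  | cons o t => simp only [List.flatMap_cons]; intro hz
                exact emit_ne_nil o (List.append_eq_nil_iff.mp hz).1

-- lstrip commutes with encoding
theorem dropWhile_enc (f : Char → List Char)
    (hf : ∀ c, PySem.Chars.isspace c = true → f c = [c])
    (hh : ∀ c, PySem.Chars.isspace c = false → ∃ d t, f c = d :: t ∧ PySem.Chars.isspace d = false)
    (buf : List Char) :
    List.dropWhile PySem.Chars.isspace (buf.flatMap f)
      = (List.dropWhile PySem.Chars.isspace buf).flatMap f := by
  induction buf with
  | nil => simp
  | cons c t ih =>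
    rcases hs : PySem.Chars.isspace c with _ | _
    · obtain ⟨d, u, hfc, hd⟩ := hh c hs
      simp [hfc, List.dropWhile_cons, hd, hs]
    · simp [hf c hs, List.dropWhile_cons, hs, ih]

theorem strip_enc (buf : List Char) :
    PySem.Chars.strip (buf.flatMap pvEnc) = (PySem.Chars.strip buf).flatMap pvEnc := by
  have henc : ∀ c, PySem.Chars.isspace c = true → pvEnc c = [c] := by
    intro c hc
    have : c ≠ '|' := by rintro rfl; simp [PySem.Chars.isspace] at hc
    simp [pvEnc, this]
  have henc2 : ∀ c, PySem.Chars.isspace c = false →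
      ∃ d t, pvEnc c = d :: t ∧ PySem.Chars.isspace d = false := by
    intro c hc
    by_cases h : c = '|'
    · exact ⟨'\x00', ['E','S','C','_','P','I','P','E','\x00'],
        by simp [pvEnc, h, pvS], by simp [PySem.Chars.isspace]⟩
    · exact ⟨c, [], by simp [pvEnc, h], hc⟩
  have hencR2 : ∀ c, PySem.Chars.isspace c = false →
      ∃ d t, (fun c => (pvEnc c).reverse) c = d :: t ∧ PySem.Chars.isspace d = false := by
    intro c hc
    by_cases h : c = '|'
    · exact ⟨'\x00', ['E','P','I','P','_','C','S','E','\x00'],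
        by simp [pvEnc, h, pvS], by simp [PySem.Chars.isspace]⟩
    · exact ⟨c, [], by simp [pvEnc, h], hc⟩
  rw [PySem.Chars.strip, PySem.Chars.strip, PySem.Chars.lstrip, PySem.Chars.lstrip,
      PySem.Chars.rstrip, PySem.Chars.rstrip]
  rw [dropWhile_enc pvEnc henc henc2 buf]
  simp only [List.reverse_flatMap, Function.comp_def]
  rw [dropWhile_enc (fun c => (pvEnc c).reverse)
    (by intro c hc; simp [henc c hc]) hencR2]
  simp only [List.reverse_flatMap, Function.comp_def, List.reverse_reverse]

-- A's final replace exactly decodes an encoded cell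
theorem restore_go (fuel : Nat) : ∀ (buf acc : List Char), pvCleanB buf →
    (buf.flatMap pvEnc).length ≤ fuel →
    PySem.Chars.replace.go pvS ['|'] fuel (buf.flatMap pvEnc) acc = acc.reverse ++ buf := by
  induction fuel with
  | zero =>
    intro buf acc hcl h
    have hb : buf = [] := by
      cases buf with
      | nil => rfl
      | cons c t =>
        exfalso
        have := emit_ne_nil (some c)
        simp only [List.flatMap_cons, List.length_append] at h
        have : (pvEnc c).length ≠ 0 := by
          simpa [pvEmit, List.length_eq_zero_iff] using this
        omega
    subst hb; simp [PySem.Chars.replace.go]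
  | succ n ih =>
    intro buf acc hcl h
    cases buf with
    | nil => simp [PySem.Chars.replace.go]
    | cons c t =>
      by_cases hc : c = '|'
      · subst hc
        have : ('|' :: t).flatMap pvEnc = pvS ++ t.flatMap pvEnc := by simp [pvEnc]
        rw [this]
        rcases hr : pvS ++ t.flatMap pvEnc with _ | ⟨d, ds⟩
        · simp [pvS] at hr
        · rw [PySem.Chars.replace.go]
          have hpre : List.isPrefixOf pvS (d :: ds) = true := by
            rw [← hr]; exact List.isPrefixOf_iff_prefix.mpr ⟨_, rfl⟩
          rw [if_pos hpre]
          have hdrop : List.drop pvS.length (d :: ds) = t.flatMap pvEnc := by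
            rw [← hr, List.drop_left]
          rw [hdrop]
          have hlen : (t.flatMap pvEnc).length ≤ n := by
            have h2 : pvS.length + (t.flatMap pvEnc).length ≤ n + 1 := by
              rw [this, List.length_append] at h; exact h
            have h10 : pvS.length = 10 := by simp [pvS]
            omega
          rw [ih t _ (fun x hx => hcl x (by simp [hx])) hlen]
          simp [pvS]
      · have hstep : (c :: t).flatMap pvEnc = c :: t.flatMap pvEnc := by simp [pvEnc, hc]
        rw [hstep, PySem.Chars.replace.go]
        have hpre : List.isPrefixOf pvS (c :: t.flatMap pvEnc) = false := by
          have hc0 : c ≠ '\x00' := hcl c (by simp)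
          rw [pvS]; simp [List.isPrefixOf]
          intro h2; exact absurd h2.symm hc0
        rw [if_neg (by simp [hpre])]
        have hlen : (t.flatMap pvEnc).length ≤ n := by
          rw [hstep, List.length_cons] at h; omega
        rw [ih t _ (fun x hx => hcl x (by simp [hx])) hlen]
        simp

theorem mem_strip (buf : List Char) (c : Char) (h : c ∈ PySem.Chars.strip buf) : c ∈ buf := by
  rw [PySem.Chars.strip, PySem.Chars.rstrip, PySem.Chars.lstrip] at h
  rw [List.mem_reverse] at h
  have h1 := (List.dropWhile_sublist (l := (List.dropWhile PySem.Chars.isspace buf).reverse)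
    (p := PySem.Chars.isspace)).mem h
  rw [List.mem_reverse] at h1
  exact (List.dropWhile_sublist (p := PySem.Chars.isspace)).mem h1

-- A's per-cell post-processing of an encoded cell is B's join-and-strip
theorem cell_enc (buf : List Char) (hcl : pvCleanB buf) :
    pvCell (buf.flatMap pvEnc) = pvJoinStrip buf := by
  rw [pvCell, strip_enc, pvJoinStrip]
  congr 1
  have hcl' : pvCleanB (PySem.Chars.strip buf) := fun c hc => hcl c (mem_strip buf c hc)
  rw [PySem.Chars.replace]
  simp only [pvS, List.isEmpty_cons, Bool.false_eq_true, if_false]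
  simpa using restore_go ((PySem.Chars.strip buf).flatMap pvEnc).length _ [] hcl' le_rfl

theorem toks_ne_nil (c : Char) (rest : List Char) : pvToks (c :: rest) ≠ [] := by
  rw [pvToks]; split_ifs <;> simp

-- B's scanner equals its token-level form
theorem scan_toks (fuel : Nat) : ∀ (l buf : List Char) (cells : List String),
    l.length ≤ fuel → pvScanGo l buf cells = pvTC (pvToks l) buf cells := by
  induction fuel with
  | zero =>
    intro l buf cells h
    have hl : l = [] := by cases l <;> simp_all
    subst hl; simp [pvScanGo, pvToks, pvTC]
  | succ n ih =>
    intro l buf cells h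
    match l with
    | [] => simp [pvScanGo, pvToks, pvTC]
    | c :: rest =>
      rw [pvScanGo, pvToks]
      by_cases hc : c = '\\' ∧ rest.head? = some '|'
      · rw [if_pos hc, if_pos hc, pvTC]
        exact ih rest.tail _ _ (by simp [List.length_tail] at h ⊢; omega)
      · rw [if_neg hc, if_neg hc]
        by_cases hp : c = '|'
        · rw [if_pos hp, if_pos hp, pvTC]
          have hiff : (pvToks rest).isEmpty = rest.isEmpty := by
            cases rest with
            | nil => simp [pvToks]
            | cons r rs => simp [toks_ne_nil r rs, List.isEmpty_iff]
          rw [hiff]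
          rcases hre : rest.isEmpty with _ | _
          · simp only [Bool.false_eq_true, if_false]
            exact ih rest _ _ (by simp at h ⊢; omega)
          · simp
        · rw [if_neg hp, if_neg hp, pvTC]
          exact ih rest _ _ (by simp at h ⊢; omega)

-- the grand induction: B's token loop equals A's token-level pipeline
theorem grand (ts : List (Option Char)) : ∀ (buf : List Char) (cells : List String),
    pvClean ts → pvCleanB buf → pvTC ts buf cells = cells ++ pvAview ts buf := by
  induction ts with
  | nil =>
    intro buf cells _ hb
    rw [pvTC, pvAview]
    simp only [List.flatMap_nil, List.append_nil]
    have hnp : PySem.Chars.endswith (buf.flatMap pvEnc) ['|'] = false := by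
      rcases he : PySem.Chars.endswith (buf.flatMap pvEnc) ['|'] with _ | _
      · rfl
      · exact absurd ((endswith_pipe_iff _).mp he) (enc_getLast_ne_pipe buf)
    rw [hnp]
    simp only [Bool.false_eq_true, if_false]
    rw [sp1_no_pipe _ (enc_no_pipe buf)]
    simp [cell_enc buf hb]
  | cons o t ih =>
    intro buf cells hcl hb
    cases o with
    | some c =>
      rw [pvTC]
      have hc : c ≠ '\x00' := hcl c (by simp)
      rw [ih _ _ (fun x hx => hcl x (by simp [hx]))
        (by intro x hx; rcases List.mem_append.mp hx with h | h
            · exact hb x h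
            · simp at h; subst h; exact hc)]
      congr 1
      rw [pvAview, pvAview]
      have : (buf ++ [c]).flatMap pvEnc ++ t.flatMap pvEmit
          = buf.flatMap pvEnc ++ (some c :: t).flatMap pvEmit := by
        simp [pvEmit]
      rw [this]
    | none =>
      rw [pvTC]
      cases t with
      | nil =>
        simp only [List.isEmpty_nil, if_true]
        rw [pvAview]
        simp only [List.flatMap_cons, List.flatMap_nil, List.append_nil]
        have hemit : pvEmit none = ['|'] := rfl
        rw [hemit]
        have hend : PySem.Chars.endswith (buf.flatMap pvEnc ++ ['|']) ['|'] = true := by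
          rw [endswith_pipe_iff]
          rw [List.getLast?_append_of_ne_nil _ (by simp)]; rfl
        rw [hend]
        simp only [if_true]
        rw [List.dropLast_concat]
        rw [sp1_no_pipe _ (enc_no_pipe buf)]
        simp [cell_enc buf hb]
      | cons o2 t2 =>
        simp only [List.isEmpty_cons, Bool.false_eq_true, if_false]
        rw [ih _ _ (fun x hx => hcl x (by simp [hx])) (by intro x hx; simp at hx)]
        rw [List.append_assoc]
        congr 1
        -- pvAview (none :: o2 :: t2) buf = pvJoinStrip buf :: pvAview (o2 :: t2) []
        rw [pvAview, pvAview]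
        have hne : (o2 :: t2).flatMap pvEmit ≠ [] := emitAll_ne_nil _ (by simp)
        have hsplit : buf.flatMap pvEnc ++ (none :: o2 :: t2).flatMap pvEmit
            = buf.flatMap pvEnc ++ '|' :: (o2 :: t2).flatMap pvEmit := by
          simp [pvEmit]
        rw [hsplit]
        have hendeq : PySem.Chars.endswith (buf.flatMap pvEnc ++ '|' :: (o2 :: t2).flatMap pvEmit) ['|']
            = PySem.Chars.endswith ((o2 :: t2).flatMap pvEmit) ['|'] := by
          rcases he1 : PySem.Chars.endswith ((o2 :: t2).flatMap pvEmit) ['|'] with _ | _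
          · rcases he2 : PySem.Chars.endswith (buf.flatMap pvEnc ++ '|' :: (o2 :: t2).flatMap pvEmit) ['|'] with _ | _
            · rfl
            · exfalso
              have h2 := (endswith_pipe_iff _).mp he2
              rw [List.getLast?_append_of_ne_nil _ (by simp), ← List.singleton_append,
                  List.getLast?_append_of_ne_nil _ hne] at h2
              have h3 := (endswith_pipe_iff _).mpr h2
              rw [he1] at h3
              exact absurd h3 (by simp)
          · rw [endswith_pipe_iff] at he1 ⊢
            rw [List.getLast?_append_of_ne_nil _ (by simp), ← List.singleton_append,
                List.getLast?_append_of_ne_nil _ hne]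
            exact he1
        rw [hendeq]
        set u := (o2 :: t2).flatMap pvEmit with hu
        have hkey : ∀ (u' : List Char),
            pvCell (pvSp1 (buf.flatMap pvEnc ++ '|' :: u')).1
              :: ((pvSp1 (buf.flatMap pvEnc ++ '|' :: u')).2).map pvCell
            = pvJoinStrip buf :: pvCell (pvSp1 u').1 :: ((pvSp1 u').2).map pvCell := by
          intro u'
          rw [sp1_append_no_pipe _ _ (enc_no_pipe buf)]
          have : pvSp1 ('|' :: u') = ([], (pvSp1 u').1 :: (pvSp1 u').2) := by
            simp [pvSp1]
          rw [this]
          simp [cell_enc buf hb]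
        simp only [List.flatMap_nil, List.nil_append]
        rcases he : PySem.Chars.endswith u ['|'] with _ | _
        · simp only [Bool.false_eq_true, if_false, List.singleton_append]
          exact (hkey u).symm
        · simp only [if_true, List.singleton_append]
          have hdl : (List.flatMap pvEnc buf ++ '|' :: u).dropLast
              = List.flatMap pvEnc buf ++ '|' :: u.dropLast := by
            rw [← List.singleton_append,
                List.dropLast_append_of_ne_nil (by simp),
                List.dropLast_append_of_ne_nil hne]
            simp
          rw [hdl]
          exact (hkey u.dropLast).symm

-- heads: the leading-pipe strip commutes with tokenization
theorem startswith_head (z : List Char) :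
    PySem.Chars.startswith z ['|'] = true ↔ z.head? = some '|' := by
  rw [PySem.Chars.startswith_iff]
  cases z with
  | nil => simp
  | cons c t => simp [List.cons_prefix_cons, eq_comm]

theorem emit_head (l : List Char) :
    ((pvToks l).flatMap pvEmit).head? = some '|' ↔ l.head? = some '|' := by
  cases l with
  | nil => simp [pvToks]
  | cons c rest =>
    rw [pvToks]
    by_cases hc : c = '\\' ∧ rest.head? = some '|'
    · rw [if_pos hc]
      simp [pvEmit, pvEnc, pvS, hc.1]
    · rw [if_neg hc]
      by_cases hp : c = '|' <;> simp [hp, pvEmit, pvEnc]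

theorem emit_tail (l : List Char) (h : l.head? = some '|') :
    ((pvToks l).flatMap pvEmit).tail = (pvToks l.tail).flatMap pvEmit := by
  cases l with
  | nil => simp at h
  | cons c rest =>
    have hc : c = '|' := by simpa using h
    subst hc
    rw [pvToks]
    rw [if_neg (by simp)]
    simp [pvEmit]

theorem toks_clean_gen (n : Nat) : ∀ (w : List Char), w.length ≤ n → (∀ c ∈ w, c ≠ '\x00') →
    pvClean (pvToks w) := by
  induction n with
  | zero =>
    intro w hw hcl
    have hnil : w = [] := by cases w <;> simp_all
    subst hnil
    intro c hc; simp [pvToks] at hc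
  | succ m ih =>
    intro w hw hcl
    cases w with
    | nil => intro c hc; simp [pvToks] at hc
    | cons d rest =>
      rw [pvToks]
      by_cases hesc : d = '\\' ∧ rest.head? = some '|'
      · rw [if_pos hesc]
        intro c hcm
        rcases List.mem_cons.mp hcm with h1 | h1
        · have hc : c = '|' := by simpa using h1
          subst hc; simp
        · exact ih rest.tail (by simp [List.length_tail] at hw ⊢; omega)
            (fun x hx => hcl x (List.mem_cons_of_mem d (List.mem_of_mem_tail hx))) c h1
      · rw [if_neg hesc]
        intro c hcm
        rcases List.mem_cons.mp hcm with h1 | h1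
        · by_cases hp : d = '|'
          · rw [if_pos hp] at h1; exact absurd h1 (by simp)
          · rw [if_neg hp] at h1
            have hc : c = d := by simpa using h1
            subst hc; exact hcl c (by simp)
        · exact ih rest (by simp at hw ⊢; omega)
            (fun x hx => hcl x (by simp [hx])) c h1

theorem toks_clean (l : List Char) (h : ∀ c ∈ l, c ≠ '\x00') : pvClean (pvToks l) :=
  toks_clean_gen l.length l le_rfl h

-- ===== VERDICT (by name: the statement is the Claim_ definition above) =====
set_option maxHeartbeats 2000000 in
theorem split_pipes_py_spec : Claim_equal_split_pipes_py := by
  intro line hdom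
  unfold Spec_split_pipes_py split_pipes_py split_pipes_py_alt
  have hnul : ∀ c ∈ line.toList, c ≠ '\x00' := by
    intro c hc
    have := List.all_eq_true.mp hdom c hc
    intro h0; subst h0; simp [pvDomChar] at this
  -- reduce A's pipeline to the token level
  have hsent : ("\x00ESC_PIPE\x00" : String).toList = pvS := by decide
  have hesc : ("\\|" : String).toList = ['\\','|'] := by decide
  have hpipe : ("|" : String).toList = ['|'] := by decide
  simp only []
  have h1 : (PySem.Str.replace line "\\|" "\x00ESC_PIPE\x00").toList
      = (pvToks line.toList).flatMap pvEmit := by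
    rw [PySem.Str.replace, String.toList_ofList, hesc, hsent, replace_toks]
  -- the stripped line, on both sides
  set l := line.toList with hl
  set l1 := if PySem.Str.startswith line "|" then l.tail else l with hl1
  have hBstart : PySem.Str.startswith line "|" = (decide (l.head? = some '|')) := by
    rw [PySem.Str.startswith, hpipe]
    rcases h : PySem.Chars.startswith l ['|'] with _ | _
    · have := (startswith_head l).not.mp (by simp [h])
      simp [this]
    · have := (startswith_head l).mp h
      simp [this]
  have hAstart : PySem.Str.startswith (PySem.Str.replace line "\\|" "\x00ESC_PIPE\x00") "|"
      = (decide (l.head? = some '|')) := by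
    rw [PySem.Str.startswith, hpipe, h1]
    rcases h : PySem.Chars.startswith ((pvToks l).flatMap pvEmit) ['|'] with _ | _
    · have := (emit_head l).not.mp ((startswith_head _).not.mp (by simp [h]))
      simp [this]
    · have := (emit_head l).mp ((startswith_head _).mp h)
      simp [this]
  have h2 : (if PySem.Str.startswith (PySem.Str.replace line "\\|" "\x00ESC_PIPE\x00") "|"
        then PySem.Str.slice (PySem.Str.replace line "\\|" "\x00ESC_PIPE\x00") (some 1) none
        else PySem.Str.replace line "\\|" "\x00ESC_PIPE\x00").toList
      = (pvToks l1).flatMap pvEmit := by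
    rw [hAstart, hl1, hBstart]
    rcases hh : decide (l.head? = some '|') with _ | _
    · simp only [Bool.false_eq_true, if_false]; exact h1
    · simp only [if_true]
      have hh' : l.head? = some '|' := of_decide_eq_true hh
      rw [PySem.Str.toList_slice, PySem.Chars.slice_eq_listSlice, PySem.List.slice_from, h1]
      · rw [← emit_tail l hh']; simp [List.drop_one]
      · simp
  -- A's remaining pipeline equals pvAview (pvToks l1) []
  set line2 := if PySem.Str.startswith (PySem.Str.replace line "\\|" "\x00ESC_PIPE\x00") "|"
        then PySem.Str.slice (PySem.Str.replace line "\\|" "\x00ESC_PIPE\x00") (some 1) none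
        else PySem.Str.replace line "\\|" "\x00ESC_PIPE\x00" with hline2
  have hend : PySem.Str.endswith line2 "|"
      = PySem.Chars.endswith ((pvToks l1).flatMap pvEmit) ['|'] := by
    rw [PySem.Str.endswith, hpipe, h2]
  have h3 : (if PySem.Str.endswith line2 "|"
        then PySem.Str.slice line2 none (some (-1)) else line2).toList
      = (if PySem.Chars.endswith ((pvToks l1).flatMap pvEmit) ['|']
         then ((pvToks l1).flatMap pvEmit).dropLast else (pvToks l1).flatMap pvEmit) := by
    rw [hend]
    rcases he : PySem.Chars.endswith ((pvToks l1).flatMap pvEmit) ['|'] with _ | _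
    · simp only [Bool.false_eq_true, if_false]; exact h2
    · simp only [if_true]
      rw [PySem.Str.slice_to_neg_one, h2]
  set line3 := if PySem.Str.endswith line2 "|"
        then PySem.Str.slice line2 none (some (-1)) else line2 with hline3
  have hsplit : PySem.Str.split? line3 "|"
      = some (((pvSp1 line3.toList).1 :: (pvSp1 line3.toList).2).map String.ofList) := by
    rw [PySem.Str.split?, PySem.Chars.split?, hpipe]
    simp only [List.isEmpty_cons, Bool.false_eq_true, if_false]
    rw [splitOn_sp1]
    rfl
  -- B side
  have hB : pvScanGo l1 [] [] = pvTC (pvToks l1) [] [] :=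
    scan_toks l1.length l1 [] [] le_rfl
  have hclean : pvClean (pvToks l1) := by
    apply toks_clean
    intro c hc
    apply hnul
    rw [hl1] at hc
    rcases hif : decide (l.head? = some '|') with _ | _
    · rw [hBstart, hif] at hc; simpa using hc
    · rw [hBstart, hif] at hc
      simp only [if_true] at hc
      exact List.mem_of_mem_tail hc
  have hgrand : pvTC (pvToks l1) [] [] = pvAview (pvToks l1) [] := by
    rw [grand (pvToks l1) [] [] hclean (by intro x hx; simp at hx)]
    simp
  -- A side assembled without rewriting inside the big goal
  have hmapcell : ∀ x : List Char,
      PySem.Str.replace (PySem.Str.strip (String.ofList x)) "\x00ESC_PIPE\x00" "|" = pvCell x := by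
    intro x
    rw [PySem.Str.replace, PySem.Str.strip, String.toList_ofList, String.toList_ofList,
        hsent, hpipe, pvCell]
  have hmap : ∀ z : List Char,
      (((pvSp1 z).1 :: (pvSp1 z).2).map String.ofList).map
        (fun c => PySem.Str.replace (PySem.Str.strip c) "\x00ESC_PIPE\x00" "|")
      = ((pvSp1 z).1 :: (pvSp1 z).2).map pvCell := by
    intro z
    rw [List.map_map]
    apply List.map_congr_left
    intro x _
    exact hmapcell x
  have hAview : ((pvSp1 (if PySem.Chars.endswith ((pvToks l1).flatMap pvEmit) ['|']
          then ((pvToks l1).flatMap pvEmit).dropLast else (pvToks l1).flatMap pvEmit)).1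
        :: (pvSp1 (if PySem.Chars.endswith ((pvToks l1).flatMap pvEmit) ['|']
          then ((pvToks l1).flatMap pvEmit).dropLast else (pvToks l1).flatMap pvEmit)).2).map pvCell
      = pvAview (pvToks l1) [] := by
    simp only [pvAview, List.flatMap_nil, List.nil_append, List.map_cons]
  have hA : (((pvSp1 line3.toList).1 :: (pvSp1 line3.toList).2).map String.ofList).map
        (fun c => PySem.Str.replace (PySem.Str.strip c) "\x00ESC_PIPE\x00" "|")
      = pvAview (pvToks l1) [] :=
    (hmap line3.toList).trans
      ((congrArg (fun z => ((pvSp1 z).1 :: (pvSp1 z).2).map pvCell) h3).trans hAview)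
  rw [hsplit]
  simp only [Option.getD_some]
  rw [hB, hgrand]
  exact hA
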